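-- pv_equiv track=rewrite | github.com/joshnisly/wordament | search.py | load_from_string
-- ===== SOURCE A (Python) =====
-- GRID_SIZE = 4
--
-- def load_from_string(letters):
--     list_letters = []
--     for letter in letters:
--         if letter.isupper() and list_letters and list_letters[-1].isupper():
--             list_letters[-1] += letter
--         else:
--             list_letters.append(letter)
--     list_letters = [x.lower() for x in list_letters]
--     return [list_letters[x*GRID_SIZE:(x+1)*GRID_SIZE] for x in range(0, GRID_SIZE)]
-- ===== SOURCE B (Python) =====
-- GRID_SIZE = 4
--
-- def load_from_string(letters):
--     # Scan runs with an index: an uppercase run becomes one cell via a slice,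
--     # any other character is its own cell.
--     cells = []
--     i = 0
--     n = len(letters)
--     while i < n:
--         if letters[i].isupper():
--             j = i
--             while j < n and letters[j].isupper():
--                 j += 1
--             cells.append(letters[i:j])
--             i = j
--         else:
--             cells.append(letters[i])
--             i += 1
--     cells = [c.lower() for c in cells]
--     return [cells[i*GRID_SIZE:(i+1)*GRID_SIZE] for i in range(GRID_SIZE)]
-- ===== Notes on version B (the rewrite author's own statement) =====
-- stated objective: alternative
-- what changed: Replaces A's stateful fold that mutates the last cell (append-or-merge depending on an isupper test of the accumulated last cell) with an index-based run scanner that slices each maximal uppercase run out in one step; no cell is ever re-inspected or rewritten.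
import Mathlib
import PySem

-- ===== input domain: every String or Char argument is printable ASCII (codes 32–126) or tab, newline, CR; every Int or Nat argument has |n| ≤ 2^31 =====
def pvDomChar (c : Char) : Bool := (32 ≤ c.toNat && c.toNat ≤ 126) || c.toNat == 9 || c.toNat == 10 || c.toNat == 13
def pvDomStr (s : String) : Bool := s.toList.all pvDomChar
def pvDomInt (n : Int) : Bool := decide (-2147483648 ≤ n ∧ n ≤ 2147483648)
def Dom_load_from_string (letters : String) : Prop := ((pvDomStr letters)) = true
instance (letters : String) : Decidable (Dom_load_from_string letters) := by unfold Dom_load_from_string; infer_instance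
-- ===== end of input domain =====

-- ===== PORT A =====
-- B replaces A's stateful append-or-merge fold with an index run scanner: alternative decomposition, same result.
-- Python str.isupper() for a cell string: no lowercase character and at least one uppercase
-- character (exact on the ASCII domain the theorems cover).
def pvStrIsupper (cs : List Char) : Bool :=
  cs.all (fun c => !PySem.Chars.islower c) && cs.any (fun c => PySem.Chars.isupper c)

-- one iteration of A's for-loop over `list_letters`
def pvStepA (acc : List (List Char)) (letter : Char) : List (List Char) :=
  if PySem.Chars.isupper letter && !acc.isEmpty && pvStrIsupper (acc.getLast?.getD []) then
    acc.dropLast ++ [(acc.getLast?.getD []) ++ [letter]]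
  else
    acc ++ [[letter]]

def load_from_string (letters : String) : List (List String) :=
  let list_letters := letters.toList.foldl pvStepA []
  let lowered := list_letters.map (fun cs => String.ofList (PySem.Chars.lower cs))
  (PySem.List.pyRange 0 4 1).map (fun x =>
    PySem.List.slice lowered (some (x * 4)) (some ((x + 1) * 4)))

-- ===== PORT B =====
-- Source B's outer while: the inner `while j < n and letters[j].isupper()` plus the slice
-- letters[i:j] is the maximal uppercase run (takeWhile), and `i = j` skips it (dropWhile).
def pvCellsB (cs : List Char) : List (List Char) :=
  match cs with
  | [] => []
  | c :: rest =>
    if PySem.Chars.isupper c then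
      (c :: rest.takeWhile PySem.Chars.isupper)
        :: pvCellsB (rest.dropWhile PySem.Chars.isupper)
    else
      [c] :: pvCellsB rest
termination_by cs.length
decreasing_by
  · exact Nat.lt_succ_of_le (rest.length_dropWhile_le _)
  · simp

def load_from_string_alt (letters : String) : List (List String) :=
  let cells := pvCellsB letters.toList
  let lowered := cells.map (fun cs => String.ofList (PySem.Chars.lower cs))
  (PySem.List.pyRange 0 4 1).map (fun i =>
    PySem.List.slice lowered (some (i * 4)) (some ((i + 1) * 4)))

-- ===== PRECONDITION & SPEC =====
def Spec_load_from_string (letters : String) (out : List (List String)) : Prop := out = load_from_string_alt letters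
instance (letters : String) (out : List (List String)) : Decidable (Spec_load_from_string letters out) := by unfold Spec_load_from_string; infer_instance

-- ===== CLAIM (what is proved, stated in full; the proofs are below) =====
def Claim_equal_load_from_string : Prop := ∀ (letters : String), Dom_load_from_string letters → Spec_load_from_string letters (load_from_string letters)

-- ===== LEMMAS AND PROOFS =====

theorem pvNotLower_of_upper (c : Char) (h : PySem.Chars.isupper c = true) :
    PySem.Chars.islower c = false := by
  simp [PySem.Chars.isupper] at h
  simp [PySem.Chars.islower]
  intro hac
  exact absurd (hac.trans h.2) (by decide)

theorem pvStrIsupper_singleton (c : Char) : pvStrIsupper [c] = PySem.Chars.isupper c := by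
  cases h : PySem.Chars.isupper c with
  | true => simp [pvStrIsupper, h, pvNotLower_of_upper c h]
  | false => simp [pvStrIsupper, h]

theorem pvStrIsupper_snoc (cell : List Char) (c : Char)
    (h1 : pvStrIsupper cell = true) (h2 : PySem.Chars.isupper c = true) :
    pvStrIsupper (cell ++ [c]) = true := by
  simp only [pvStrIsupper, Bool.and_eq_true, List.all_append, List.any_append] at *
  simp [h1.1, h2, pvNotLower_of_upper c h2]

-- characterisation of A's fold on a nonempty accumulator
theorem pvFoldA_char (cs : List Char) : ∀ (pre : List (List Char)) (cell : List Char),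
    List.foldl pvStepA (pre ++ [cell]) cs =
      (if pvStrIsupper cell then
        pre ++ ((cell ++ cs.takeWhile PySem.Chars.isupper)
          :: pvCellsB (cs.dropWhile PySem.Chars.isupper))
      else
        pre ++ (cell :: pvCellsB cs)) := by
  induction cs with
  | nil => intro pre cell; split <;> simp [pvCellsB]
  | cons c rest ih =>
    intro pre cell
    by_cases hcell : pvStrIsupper cell = true
    · by_cases hc : PySem.Chars.isupper c = true
      · have hstep : pvStepA (pre ++ [cell]) c = pre ++ [cell ++ [c]] := by
          simp [pvStepA, hc, hcell]
        have hmerge := pvStrIsupper_snoc cell c hcell hc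
        simp only [List.foldl_cons, hstep, ih pre (cell ++ [c]), hmerge,
          List.takeWhile_cons, List.dropWhile_cons, hc, hcell]
        simp
      · have hstep : pvStepA (pre ++ [cell]) c = (pre ++ [cell]) ++ [[c]] := by
          simp [pvStepA, hc]
        simp only [List.foldl_cons, hstep, ih (pre ++ [cell]) [c],
          pvStrIsupper_singleton, hc, hcell]
        simp [pvCellsB, hc]
    · by_cases hc : PySem.Chars.isupper c = true
      · have hstep : pvStepA (pre ++ [cell]) c = (pre ++ [cell]) ++ [[c]] := by
          simp [pvStepA, hcell]
        simp only [List.foldl_cons, hstep, ih (pre ++ [cell]) [c],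
          pvStrIsupper_singleton, hc, hcell]
        simp [pvCellsB, hc]
      · have hstep : pvStepA (pre ++ [cell]) c = (pre ++ [cell]) ++ [[c]] := by
          simp [pvStepA, hc]
        simp only [List.foldl_cons, hstep, ih (pre ++ [cell]) [c],
          pvStrIsupper_singleton, hc, hcell]
        simp [pvCellsB, hc]

theorem pvFoldA_eq_cellsB (cs : List Char) :
    List.foldl pvStepA [] cs = pvCellsB cs := by
  cases cs with
  | nil => simp [pvCellsB]
  | cons c rest =>
    have hstep : pvStepA [] c = [] ++ [[c]] := by simp [pvStepA]
    rw [List.foldl_cons, hstep, pvFoldA_char rest [] [c]]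
    by_cases hc : PySem.Chars.isupper c = true <;>
      simp [pvStrIsupper_singleton, hc, pvCellsB]

-- ===== VERDICT (by name: the statement is the Claim_ definition above) =====
theorem load_from_string_spec : Claim_equal_load_from_string := by
  intro letters _
  unfold Spec_load_from_string load_from_string load_from_string_alt
  rw [pvFoldA_eq_cellsB]
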